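-- pv_equiv track=rewrite | github.com/jonathanpaulson/AdventOfCode | 2021/8.py | find_perm_slow
-- ===== SOURCE A (Python) =====
-- import itertools
--
-- digits = {
--     0: 'abcefg',
--     1: 'cf',
--     2: 'acdeg',
--     3: 'acdfg',
--     4: 'bcdf',
--     5: 'abdfg',
--     6: 'abdefg',
--     7: 'acf',
--     8: 'abcdefg',
--     9: 'abcdfg',
-- }
--
-- def find_perm_slow(before):
--     for perm in itertools.permutations(list(range(8))):
--         ok = True
--         D = {}
--         for i in range(8):
--             D[chr(ord('a')+i)] = chr(ord('a')+perm[i])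
--         for w in before:
--             w_perm = ''
--             for c in w:
--                 w_perm += D[c]
--             w_perm = ''.join(sorted(w_perm))
--
--             if w_perm not in digits.values():
--                 ok = False
--         if ok:
--             return D
-- ===== SOURCE B (Python) =====
-- DIGIT_PATTERNS = ('abcefg', 'cf', 'acdeg', 'acdfg', 'bcdf', 'abdfg',
--                   'abdefg', 'acf', 'abcdefg', 'abcdfg')
--
-- def find_perm_slow(before):
--     valid = set(DIGIT_PATTERNS)
--     words = list(before)
--
--     def depth(w):
--         # number of assigned positions needed before w's image is determined
--         return 1 + max(ord(c) - 97 for c in w) if w else 0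
--
--     def mapped(w, assign):
--         s = ''
--         for c in w:
--             s += assign[ord(c) - 97]
--         return ''.join(sorted(s))
--
--     def dfs(assign, avail):
--         k = len(assign)
--         # prune: a word that just became fully determined must map to a digit
--         if any(depth(w) == k and mapped(w, assign) not in valid for w in words):
--             return None
--         if not avail:
--             return {chr(97 + i): assign[i] for i in range(8)}
--         for j, v in enumerate(avail):
--             r = dfs(assign + [v], avail[:j] + avail[j + 1:])
--             if r is not None:
--                 return r
--         return None
--
--     return dfs([], [chr(97 + i) for i in range(8)])
-- ===== Notes on version B (the rewrite author's own statement) =====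
-- stated objective: faster
-- what changed: B replaces A's flat scan of all 8! complete permutations (rebuilding the dict and re-checking every word for each) by a lexicographic backtracking search over partial assignments that prunes a whole branch as soon as some word whose letters are all assigned fails to map to a digit pattern; the first surviving leaf is the same first permutation A finds.
import Mathlib
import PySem

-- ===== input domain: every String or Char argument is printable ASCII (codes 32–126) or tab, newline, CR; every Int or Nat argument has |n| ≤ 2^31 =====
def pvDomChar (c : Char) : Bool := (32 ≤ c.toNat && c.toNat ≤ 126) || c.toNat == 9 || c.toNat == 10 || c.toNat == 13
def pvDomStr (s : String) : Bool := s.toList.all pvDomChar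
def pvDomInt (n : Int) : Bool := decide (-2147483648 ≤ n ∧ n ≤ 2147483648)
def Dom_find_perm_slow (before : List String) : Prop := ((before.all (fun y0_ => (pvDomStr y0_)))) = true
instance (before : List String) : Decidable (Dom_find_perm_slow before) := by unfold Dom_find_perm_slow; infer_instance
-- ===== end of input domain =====

-- B replaces A's flat scan of all 8! permutations by a lexicographic backtracking
-- search that prunes a branch as soon as a fully-determined word fails to map to a
-- digit pattern; same first permutation is found. (Equivalence is about the return
-- value; neither version mutates its argument.)

-- ===== PORT A =====

-- chr(n) for the code points used here (97..104; ASCII)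
def pvChr (n : Int) : String := String.mk [Char.ofNat n.toNat]

-- digits.values(), each string as its list of code points
def pvDigitsL : List (List Char) :=
  [['a','b','c','e','f','g'], ['c','f'], ['a','c','d','e','g'], ['a','c','d','f','g'],
   ['b','c','d','f'], ['a','b','d','f','g'], ['a','b','d','e','f','g'], ['a','c','f'],
   ['a','b','c','d','e','f','g'], ['a','b','c','d','f','g']]

-- selecting each element in turn with the rest (shared shape of itertools.permutations
-- and of B's loop 'for j, v in enumerate(avail): … avail[:j] + avail[j+1:]')
def pvSelects {α : Type} : List α → List (α × List α)
  | [] => []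
  | x :: xs => (x, xs) :: (pvSelects xs).map (fun p => (p.1, x :: p.2))

theorem pvSelects_length {α : Type} : ∀ (l : List α) (p : α × List α),
    p ∈ pvSelects l → p.2.length + 1 = l.length := by
  intro l
  induction l with
  | nil => intro p hp; simp [pvSelects] at hp
  | cons x xs ih =>
    intro p hp
    simp [pvSelects] at hp
    rcases hp with rfl | ⟨q, r, hmem, rfl⟩
    · simp
    · have := ih (q, r) hmem
      simp only [List.length_cons] at this ⊢
      omega

-- itertools.permutations(l): all permutations in lexicographic selection order
def pvPerms {α : Type} : List α → List (List α)
  | [] => [[]]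
  | x :: xs =>
    (pvSelects (x :: xs)).attach.flatMap (fun p => (pvPerms p.1.2).map (p.1.1 :: ·))
termination_by l => l.length
decreasing_by
  have := pvSelects_length (x :: xs) p.1 p.2
  simp only [List.length_cons] at this ⊢
  omega

-- D = {chr(97+i): chr(97+perm[i]) for i in range(8)}  (perm[i] always in range: perm has 8 entries)
def pvDictA (perm : List Int) : PySem.Dict String String :=
  (PySem.List.pyRange 0 8 1).foldl
    (fun D i => D.insert (pvChr (97 + i)) (pvChr (97 + PySem.List.pyGetD perm i 0)))
    PySem.Dict.empty

-- w_perm = ''.join(sorted(''.join(D[c] for c in w)))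
-- D[c] raises KeyError for a char outside 'a'..'h' — those inputs are excluded by Pre_
def pvWordA (D : PySem.Dict String String) (w : String) : List Char :=
  PySem.List.sorted
    (w.toList.foldl (fun acc c => acc ++ (D.getD (String.mk [c]) "").toList) [])
    (fun x => x) false

-- the 'ok' flag loop over before
def pvOkA (D : PySem.Dict String String) (before : List String) : Bool :=
  before.foldl (fun ok w => if pvDigitsL.contains (pvWordA D w) then ok else false) true

def pvLoopA (before : List String) : List (List Int) → Option (List (String × String))
  | [] => none
  | p :: ps =>
    let D := pvDictA p
    if pvOkA D before then some D.items else pvLoopA before ps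

def find_perm_slow (before : List String) : Option (List (String × String)) :=
  pvLoopA before (pvPerms (PySem.List.pyRange 0 8 1))

-- ===== PORT B =====

-- valid = set(DIGIT_PATTERNS)
def pvValid : PySem.Set (List Char) := PySem.Set.ofList pvDigitsL

-- ord(c) - 97
def pvIdx (c : Char) : Int := (c.toNat : Int) - 97

-- depth(w) = 1 + max(ord(c)-97 for c in w) if w else 0
def pvDepth (w : List Char) : Int :=
  if w.isEmpty then 0
  else 1 + (PySem.List.max? (w.map pvIdx) (fun x => x)).getD 0  -- max of a nonempty list: always some

-- mapped(w, assign): assign[ord(c)-97] concatenated, then sorted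
-- (IndexError from assign[·] — only for chars outside 'a'..'h', excluded by Pre_ — is
--  conflated with "not a digit pattern" below)
def pvMappedB (assign : List String) (w : List Char) : Option (List Char) :=
  (w.foldl (fun acc c => acc.bind (fun s =>
      (PySem.List.pyGet? assign (pvIdx c)).map (fun v => s ++ v.toList))) (some []))
    |>.map (fun s => PySem.List.sorted s (fun x => x) false)

def pvOkB (assign : List String) (w : List Char) : Bool :=
  (pvMappedB assign w).elim false (fun m => PySem.Set.contains pvValid m)

-- any(depth(w) == k and mapped(w, assign) not in valid for w in words)
def pvPruneB (words : List (List Char)) (assign : List String) : Bool :=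
  words.any (fun w => pvDepth w == (assign.length : Int) && !(pvOkB assign w))

-- {chr(97+i): assign[i] for i in range(8)}  (assign[i] in range: assign has 8 entries here)
def pvOut (assign : List String) : List (String × String) :=
  (PySem.List.pyRange 0 8 1).map (fun i => (pvChr (97 + i), PySem.List.pyGetD assign i ""))

-- the prune test is shared by both arms and does not depend on avail, so matching on
-- avail first is value-equal to Python's "prune; if not avail: …; loop"
def pvDfs (words : List (List Char)) (assign : List String) :
    List String → Option (List (String × String))
  | [] => if pvPruneB words assign then none else some (pvOut assign)
  | a :: rest =>
    if pvPruneB words assign then none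
    else
      (pvSelects (a :: rest)).attach.findSome?
        (fun p => pvDfs words (assign ++ [p.1.1]) p.1.2)
termination_by avail => avail.length
decreasing_by
  have := pvSelects_length (a :: rest) p.1 p.2
  simp only [List.length_cons] at this ⊢
  omega

def find_perm_slow_alt (before : List String) : Option (List (String × String)) :=
  pvDfs (before.map String.toList) []
    ((PySem.List.pyRange 0 8 1).map (fun i => pvChr (97 + i)))

-- ===== PRECONDITION & SPEC =====

-- Pre_ excludes exactly the inputs on which A raises KeyError: some word containing a
-- character outside 'a'..'h' (D only has the keys 'a'..'h').
def Pre_find_perm_slow (before : List String) : Prop :=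
  (before.all (fun w =>
    w.toList.all (fun c => (['a','b','c','d','e','f','g','h'] : List Char).contains c))) = true

instance (before : List String) : Decidable (Pre_find_perm_slow before) := by
  unfold Pre_find_perm_slow; infer_instance

def pvWitness_find_perm_slow : List String := (["cf", "acf"])

def Spec_find_perm_slow (before : List String) (out : Option (List (String × String))) : Prop :=
  out = find_perm_slow_alt before
instance (before : List String) (out : Option (List (String × String))) :
    Decidable (Spec_find_perm_slow before out) := by unfold Spec_find_perm_slow; infer_instance

-- ===== CLAIM (what is proved, stated in full; the proofs are below) =====
def Claim_equal_find_perm_slow : Prop :=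
  ∀ (before : List String), Dom_find_perm_slow before → Pre_find_perm_slow before →
    Spec_find_perm_slow before (find_perm_slow before)

-- ===== LEMMAS AND PROOFS =====

-- the good characters
def pvGood : List Char := ['a','b','c','d','e','f','g','h']

theorem pvGood_idx {c : Char} (hc : c ∈ pvGood) : 0 ≤ pvIdx c ∧ pvIdx c ≤ 7 := by
  fin_cases hc <;> decide

-- perm entries imaged into letters
def pvToAssign (p : List Int) : List String := p.map (fun v => pvChr (97 + v))

theorem pvLen8 (p : List Int) (h : p.length = 8) :
    ∃ a b c d e f g h', p = [a,b,c,d,e,f,g,h'] := by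
  rcases p with _ | ⟨a, p⟩; · simp at h
  rcases p with _ | ⟨b, p⟩; · simp at h
  rcases p with _ | ⟨c, p⟩; · simp at h
  rcases p with _ | ⟨d, p⟩; · simp at h
  rcases p with _ | ⟨e, p⟩; · simp at h
  rcases p with _ | ⟨f, p⟩; · simp at h
  rcases p with _ | ⟨g, p⟩; · simp at h
  rcases p with _ | ⟨h', p⟩; · simp at h
  rcases p with _ | ⟨x, p⟩
  · exact ⟨a, b, c, d, e, f, g, h', rfl⟩
  · simp at h

-- findSome? toolbox
theorem pvFindSome?_congr {α β : Type} (l : List α) (f g : α → Option β)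
    (h : ∀ x ∈ l, f x = g x) : l.findSome? f = l.findSome? g := by
  induction l with
  | nil => rfl
  | cons a t ih =>
    simp only [List.findSome?_cons, h a (by simp)]
    cases g a with
    | none => exact ih (fun x hx => h x (by simp [hx]))
    | some b => rfl

theorem pvFindSome?_eq_none {α β : Type} (l : List α) (f : α → Option β)
    (h : ∀ x ∈ l, f x = none) : l.findSome? f = none := by
  induction l with
  | nil => rfl
  | cons a t ih => simp only [List.findSome?_cons, h a (by simp)]
                   exact ih (fun x hx => h x (by simp [hx]))

theorem pvFindSome?_map {α β γ : Type} (l : List α) (h : α → β) (f : β → Option γ) :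
    (l.map h).findSome? f = l.findSome? (fun x => f (h x)) := by
  induction l with
  | nil => rfl
  | cons a t ih => simp only [List.map_cons, List.findSome?_cons, ih]

theorem pvFindSome?_flatMap {α β γ : Type} (l : List α) (g : α → List β) (f : β → Option γ) :
    (l.flatMap g).findSome? f = l.findSome? (fun x => (g x).findSome? f) := by
  induction l with
  | nil => rfl
  | cons a t ih =>
    simp only [List.flatMap_cons, List.findSome?_append, List.findSome?_cons, ih]
    cases (g a).findSome? f <;> simp

theorem pvFindSome?_attach {α β : Type} (l : List α) (f : α → Option β) :
    l.attach.findSome? (fun p => f p.1) = l.findSome? f := by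
  rw [show l.attach.findSome? (fun p => f p.1) = (l.attach.map Subtype.val).findSome? f from
    (pvFindSome?_map l.attach Subtype.val f).symm]
  simp

-- pvSelects under map
theorem pvSelects_map {α β : Type} (h : α → β) :
    ∀ (l : List α), pvSelects (l.map h) = (pvSelects l).map (fun p => (h p.1, p.2.map h)) := by
  intro l
  induction l with
  | nil => rfl
  | cons x xs ih => simp [pvSelects, ih, List.map_map, Function.comp_def]

theorem pvPerms_cons {α : Type} (x : α) (xs : List α) :
    pvPerms (x :: xs) = (pvSelects (x :: xs)).flatMap (fun q => (pvPerms q.2).map (q.1 :: ·)) := by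
  rw [pvPerms]
  conv_rhs => rw [← List.attach_map_subtype_val (pvSelects (x :: xs))]
  rw [List.flatMap_map]

theorem pvPerms_map {α β : Type} (h : α → β) :
    ∀ (l : List α), pvPerms (l.map h) = (pvPerms l).map (List.map h) := by
  intro l
  induction hn : l.length using Nat.strong_induction_on generalizing l with
  | _ n ih =>
    cases l with
    | nil => simp [pvPerms]
    | cons x xs =>
      rw [List.map_cons, pvPerms_cons, pvPerms_cons,
          show h x :: xs.map h = (x :: xs).map h from rfl, pvSelects_map,
          List.flatMap_map, List.map_flatMap, List.flatMap_def, List.flatMap_def]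
      congr 1
      apply List.map_congr_left
      intro q hq
      have hlen : q.2.length < n := by
        have := pvSelects_length _ _ hq
        simp only [List.length_cons] at this hn
        omega
      rw [ih q.2.length (by omega) q.2 rfl, List.map_map, List.map_map]
      apply List.map_congr_left
      intro s _
      simp

-- every permutation has the full length
theorem pvPerms_length {α : Type} : ∀ (l : List α), ∀ p ∈ pvPerms l, p.length = l.length := by
  intro l
  induction hn : l.length using Nat.strong_induction_on generalizing l with
  | _ n ih =>
    cases l with
    | nil =>
        intro p hp
        simp [pvPerms] at hp
        simp only [List.length_nil] at hn
        simp [hp, ← hn]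
    | cons x xs =>
      intro p hp
      rw [pvPerms_cons] at hp
      simp only [List.mem_flatMap, List.mem_map] at hp
      obtain ⟨q, hq, s, hs, rfl⟩ := hp
      have hq2 := pvSelects_length (x :: xs) q hq
      have hrec := ih q.2.length (by simp only [List.length_cons] at hq2 hn; omega) q.2 rfl s hs
      simp only [List.length_cons] at hq2 hn ⊢
      omega

-- the letter keys as string literals
theorem pvK97 : pvChr 97 = "a" := by decide
theorem pvK98 : pvChr 98 = "b" := by decide
theorem pvK99 : pvChr 99 = "c" := by decide
theorem pvK100 : pvChr 100 = "d" := by decide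
theorem pvK101 : pvChr 101 = "e" := by decide
theorem pvK102 : pvChr 102 = "f" := by decide
theorem pvK103 : pvChr 103 = "g" := by decide
theorem pvK104 : pvChr 104 = "h" := by decide

-- lookup: in the dict of a length-8 perm, key chr(c) yields entry idx(c) of the image list
theorem pvLookup (p : List Int) (hp : p.length = 8) {c : Char} (hc : c ∈ pvGood) :
    PySem.List.pyGet? (pvToAssign p) (pvIdx c) = some ((pvDictA p).getD (String.mk [c]) "") := by
  obtain ⟨a, b, c', d, e, f, g, h', rfl⟩ := pvLen8 p hp
  have hr : PySem.List.pyRange 0 8 1 = [0,1,2,3,4,5,6,7] := by decide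
  unfold pvDictA
  rw [hr]
  simp only [List.foldl_cons, List.foldl_nil]
  norm_num
  rw [show PySem.List.pyGetD [a,b,c',d,e,f,g,h'] 1 0 = b from rfl,
      show PySem.List.pyGetD [a,b,c',d,e,f,g,h'] 2 0 = c' from rfl,
      show PySem.List.pyGetD [a,b,c',d,e,f,g,h'] 3 0 = d from rfl,
      show PySem.List.pyGetD [a,b,c',d,e,f,g,h'] 4 0 = e from rfl,
      show PySem.List.pyGetD [a,b,c',d,e,f,g,h'] 5 0 = f from rfl,
      show PySem.List.pyGetD [a,b,c',d,e,f,g,h'] 6 0 = g from rfl,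
      show PySem.List.pyGetD [a,b,c',d,e,f,g,h'] 7 0 = h' from rfl,
      pvK97, pvK98, pvK99, pvK100, pvK101, pvK102, pvK103, pvK104]
  fin_cases hc <;>
    · simp only [PySem.Dict.getD_insert, pvToAssign, List.map_cons, List.map_nil]
      norm_num
      rfl

theorem pvItems_eq (p : List Int) (hp : p.length = 8) :
    (pvDictA p).items = pvOut (pvToAssign p) := by
  obtain ⟨a, b, c', d, e, f, g, h', rfl⟩ := pvLen8 p hp
  have hr : PySem.List.pyRange 0 8 1 = [0,1,2,3,4,5,6,7] := by decide
  unfold pvDictA pvOut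
  rw [hr]
  simp only [List.foldl_cons, List.foldl_nil, List.map_cons, List.map_nil]
  norm_num
  rfl

-- word mapping agreement (fold invariant)
theorem pvFoldWord (p : List Int) (hp : p.length = 8) :
    ∀ (w : List Char), (∀ c ∈ w, c ∈ pvGood) → ∀ (acc : List Char),
    w.foldl (fun acc c => acc.bind (fun s =>
        (PySem.List.pyGet? (pvToAssign p) (pvIdx c)).map (fun v => s ++ v.toList))) (some acc)
      = some (w.foldl (fun acc c => acc ++ ((pvDictA p).getD (String.mk [c]) "").toList) acc) := by
  intro w
  induction w with
  | nil => intro _ acc; rfl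
  | cons c t ih =>
    intro hw acc
    have hc : c ∈ pvGood := hw c (by simp)
    simp only [List.foldl_cons, pvLookup p hp hc, Option.bind_some, Option.map_some]
    exact ih (fun x hx => hw x (by simp [hx])) _

theorem pvMappedB_toAssign (p : List Int) (hp : p.length = 8) (w : String)
    (hw : ∀ c ∈ w.toList, c ∈ pvGood) :
    pvMappedB (pvToAssign p) w.toList = some (pvWordA (pvDictA p) w) := by
  unfold pvMappedB pvWordA
  rw [pvFoldWord p hp w.toList hw []]
  rfl

-- set membership = list membership for the digit patterns
theorem pvContains_valid (m : List Char) :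
    PySem.Set.contains pvValid m = pvDigitsL.contains m := by
  have h : pvValid = pvDigitsL := by decide
  rw [h]; rfl

-- the ok-flag loop is List.all
theorem pvOkA_eq (D : PySem.Dict String String) (before : List String) :
    pvOkA D before = before.all (fun w => pvDigitsL.contains (pvWordA D w)) := by
  unfold pvOkA
  suffices h : ∀ (l : List String) (b : Bool),
      l.foldl (fun ok w => if pvDigitsL.contains (pvWordA D w) then ok else false) b
        = (b && l.all (fun w => pvDigitsL.contains (pvWordA D w))) by
    simpa using h before true
  intro l
  induction l with
  | nil => intro b; simp
  | cons w t ih =>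
    intro b
    simp only [List.foldl_cons, List.all_cons, ih]
    by_cases hc : pvDigitsL.contains (pvWordA D w) = true
    · simp only [hc, if_true, Bool.true_and]
    · simp only [Bool.not_eq_true] at hc
      simp only [hc, Bool.false_eq_true, if_false, Bool.false_and, Bool.and_false]

-- full-assignment check, B-side
def pvFullOK (words : List (List Char)) (assign : List String) : Bool :=
  words.all (fun w => pvOkB assign w)

def pvF (words : List (List Char)) (assign : List String) : Option (List (String × String)) :=
  if pvFullOK words assign then some (pvOut assign) else none

-- A's loop is findSome?
theorem pvLoopA_eq (before : List String) : ∀ (ps : List (List Int)),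
    pvLoopA before ps
      = ps.findSome? (fun p => if pvOkA (pvDictA p) before then some (pvDictA p).items else none) := by
  intro ps
  induction ps with
  | nil => rfl
  | cons p t ih =>
    rw [pvLoopA, List.findSome?_cons]
    by_cases h : pvOkA (pvDictA p) before = true <;> simp [h, ih]

-- index access only depends on the prefix
theorem pvMappedB_append (assign s : List String) (w : List Char)
    (h : ∀ c ∈ w, 0 ≤ pvIdx c ∧ pvIdx c < (assign.length : Int)) :
    pvMappedB (assign ++ s) w = pvMappedB assign w := by
  unfold pvMappedB
  suffices hs : ∀ (acc : Option (List Char)),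
      w.foldl (fun acc c => acc.bind (fun s' =>
        (PySem.List.pyGet? (assign ++ s) (pvIdx c)).map (fun v => s' ++ v.toList))) acc
      = w.foldl (fun acc c => acc.bind (fun s' =>
        (PySem.List.pyGet? assign (pvIdx c)).map (fun v => s' ++ v.toList))) acc by
    rw [hs]
  induction w with
  | nil => intro acc; rfl
  | cons c t ih =>
    intro acc
    have hc := h c (by simp)
    have hget : PySem.List.pyGet? (assign ++ s) (pvIdx c) = PySem.List.pyGet? assign (pvIdx c) := by
      rw [PySem.List.pyGet?_of_nonneg (assign ++ s) hc.1, PySem.List.pyGet?_of_nonneg assign hc.1]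
      have hlt : (pvIdx c).toNat < assign.length := by omega
      rw [List.getElem?_append_left hlt]
    simp only [List.foldl_cons, hget]
    exact ih (fun x hx => h x (by simp [hx])) _

theorem pvOkB_append (assign s : List String) (w : List Char)
    (h : ∀ c ∈ w, 0 ≤ pvIdx c ∧ pvIdx c < (assign.length : Int)) :
    pvOkB (assign ++ s) w = pvOkB assign w := by
  unfold pvOkB; rw [pvMappedB_append assign s w h]

-- depth lemmas
theorem pvIdx_lt_depth {c : Char} {w : List Char} (hc : c ∈ w) : pvIdx c < pvDepth w := by
  unfold pvDepth
  have hne : w.isEmpty = false := by cases w <;> simp_all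
  rw [hne]; simp only [Bool.false_eq_true, if_false]
  have hmem : pvIdx c ∈ w.map pvIdx := List.mem_map_of_mem hc
  have hnonnil : w.map pvIdx ≠ [] := by cases w <;> simp_all
  cases hm : PySem.List.max? (w.map pvIdx) (fun x => x) with
  | none => exact absurd ((PySem.List.max?_eq_none_iff (w.map pvIdx) (fun x => x)).mp hm) hnonnil
  | some m =>
    have := PySem.List.max?_isMax hm _ hmem
    simp at this ⊢
    omega

theorem pvDepth_nonneg {w : List Char} (hw : ∀ c ∈ w, c ∈ pvGood) : 0 ≤ pvDepth w := by
  cases w with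
  | nil => simp [pvDepth]
  | cons c t =>
    have h1 := pvGood_idx (hw c (by simp))
    have h2 := pvIdx_lt_depth (show c ∈ c :: t by simp)
    omega

theorem pvDepth_le8 {w : List Char} (hw : ∀ c ∈ w, c ∈ pvGood) : pvDepth w ≤ 8 := by
  cases hw' : w.isEmpty with
  | true => unfold pvDepth; simp [hw']
  | false =>
    unfold pvDepth; rw [hw']; simp only [Bool.false_eq_true, if_false]
    cases hm : PySem.List.max? (w.map pvIdx) (fun x => x) with
    | none => simp
    | some m =>
      have hmem := PySem.List.max?_mem hm
      obtain ⟨c, hc, rfl⟩ := List.mem_map.mp hmem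
      have := pvGood_idx (hw c hc)
      simp; omega

-- the main backtracking lemma: pruned DFS = first valid full extension
theorem pvDfs_eq (words : List (List Char))
    (hwords : ∀ w ∈ words, ∀ c ∈ w, c ∈ pvGood) :
    ∀ (n : Nat) (assign avail : List String), avail.length = n → assign.length + n = 8 →
    (∀ w ∈ words, pvDepth w < (assign.length : Int) → pvOkB assign w = true) →
    pvDfs words assign avail = (pvPerms avail).findSome? (fun s => pvF words (assign ++ s)) := by
  intro n
  induction n with
  | zero =>
    intro assign avail hlen hsum H
    have havail : avail = [] := List.eq_nil_of_length_eq_zero hlen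
    subst havail
    rw [show pvDfs words assign [] = (if pvPruneB words assign then none else some (pvOut assign)) from by simp [pvDfs]]
    by_cases hpr : pvPruneB words assign = true
    · rw [if_pos hpr]
      obtain ⟨w, hw, hdep, hok⟩ : ∃ w ∈ words, pvDepth w = (assign.length : Int) ∧ pvOkB assign w = false := by
        simpa [pvPruneB, List.any_eq_true] using hpr
      have : pvFullOK words assign = false := by
        unfold pvFullOK
        rw [List.all_eq_false]
        exact ⟨w, hw, by simp [hok]⟩
      simp [pvPerms, pvF, this]
    · rw [if_neg hpr]
      have hprf : pvPruneB words assign = false := by simpa using hpr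
      have hall : pvFullOK words assign = true := by
        simp only [pvFullOK, List.all_eq_true]
        intro w hw
        have hle := pvDepth_le8 (hwords w hw)
        have hk : (assign.length : Int) = 8 := by omega
        by_cases hlt : pvDepth w < (assign.length : Int)
        · exact H w hw hlt
        · have heq : pvDepth w = (assign.length : Int) := by omega
          have hnp : ∀ x ∈ words, pvDepth x = (assign.length : Int) → pvOkB assign x = true := by
            simpa [pvPruneB] using hprf
          exact hnp w hw heq
      simp [pvPerms, pvF, hall]
  | succ m ih =>
    intro assign avail hlen hsum H
    cases avail with
    | nil => simp at hlen
    | cons a rest =>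
      rw [show pvDfs words assign (a :: rest) = (if pvPruneB words assign then none else (pvSelects (a :: rest)).attach.findSome? (fun p => pvDfs words (assign ++ [p.1.1]) p.1.2)) from by simp [pvDfs]]
      by_cases hpr : pvPruneB words assign = true
      · rw [if_pos hpr]
        obtain ⟨w, hw, hdep, hok⟩ : ∃ w ∈ words, pvDepth w = (assign.length : Int) ∧ pvOkB assign w = false := by
          simpa [pvPruneB, List.any_eq_true] using hpr
        symm
        apply pvFindSome?_eq_none
        intro s _
        have hbound : ∀ c ∈ w, 0 ≤ pvIdx c ∧ pvIdx c < (assign.length : Int) := by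
          intro c hc
          exact ⟨(pvGood_idx (hwords w hw c hc)).1, by have := pvIdx_lt_depth hc; omega⟩
        have : pvOkB (assign ++ s) w = false := by rw [pvOkB_append assign s w hbound]; exact hok
        have hfull : pvFullOK words (assign ++ s) = false := by
          unfold pvFullOK
          rw [List.all_eq_false]
          exact ⟨w, hw, by simp [this]⟩
        simp [pvF, hfull]
      · rw [if_neg hpr]
        -- unfold both sides to a findSome? over pvSelects
        rw [pvFindSome?_attach ((pvSelects (a :: rest)))
              (fun q => pvDfs words (assign ++ [q.1]) q.2)]
        conv_rhs => rw [pvPerms]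
        rw [show ((pvSelects (a :: rest)).attach.flatMap
              (fun p => (pvPerms p.1.2).map (p.1.1 :: ·))).findSome? (fun s => pvF words (assign ++ s))
            = (pvSelects (a :: rest)).attach.findSome?
              (fun p => ((pvPerms p.1.2).map (p.1.1 :: ·)).findSome? (fun s => pvF words (assign ++ s)))
          from pvFindSome?_flatMap _ _ _]
        rw [pvFindSome?_attach ((pvSelects (a :: rest)))
              (fun q => ((pvPerms q.2).map (q.1 :: ·)).findSome? (fun s => pvF words (assign ++ s)))]
        apply pvFindSome?_congr
        intro q hq
        rw [pvFindSome?_map]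
        have hqlen : q.2.length = m := by
          have := pvSelects_length _ _ hq
          simp only [List.length_cons] at this hlen
          omega
        have hsum' : (assign ++ [q.1]).length + m = 8 := by simp; omega
        have H' : ∀ w ∈ words, pvDepth w < ((assign ++ [q.1]).length : Int) →
            pvOkB (assign ++ [q.1]) w = true := by
          intro w hw hdep
          have hlenq : ((assign ++ [q.1]).length : Int) = (assign.length : Int) + 1 := by simp
          have hle : pvDepth w ≤ (assign.length : Int) := by omega
          have hbound : ∀ c ∈ w, 0 ≤ pvIdx c ∧ pvIdx c < (assign.length : Int) := by
            intro c hc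
            exact ⟨(pvGood_idx (hwords w hw c hc)).1, by have := pvIdx_lt_depth hc; omega⟩
          rw [pvOkB_append assign [q.1] w hbound]
          by_cases hlt : pvDepth w < (assign.length : Int)
          · exact H w hw hlt
          · have heq : pvDepth w = (assign.length : Int) := by omega
            have hprf : pvPruneB words assign = false := by simpa using hpr
            have hnp : ∀ x ∈ words, pvDepth x = (assign.length : Int) → pvOkB assign x = true := by
              simpa [pvPruneB] using hprf
            exact hnp w hw heq
        rw [ih (assign ++ [q.1]) q.2 hqlen hsum' H']
        apply pvFindSome?_congr
        intro s _
        have : assign ++ [q.1] ++ s = assign ++ (q.1 :: s) := by simp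
        rw [this]

-- ===== VERDICT (by name: the statement is the Claim_ definition above) =====
theorem pvAll_congr {α : Type} (l : List α) (p q : α → Bool)
    (h : ∀ x ∈ l, p x = q x) : l.all p = l.all q := by
  induction l with
  | nil => rfl
  | cons a t ih =>
    simp only [List.all_cons, h a (by simp)]
    rw [ih (fun x hx => h x (by simp [hx]))]

theorem find_perm_slow_spec : Claim_equal_find_perm_slow := by
  unfold Claim_equal_find_perm_slow
  intro before _hdom hpre
  unfold Spec_find_perm_slow find_perm_slow find_perm_slow_alt
  have hpre' : ∀ w ∈ before, ∀ c ∈ w.toList, c ∈ pvGood := by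
    intro w hw c hc
    have h1 := List.all_eq_true.mp hpre w hw
    have h2 := List.all_eq_true.mp h1 c hc
    simpa [pvGood] using h2
  have hwords : ∀ w ∈ before.map String.toList, ∀ c ∈ w, c ∈ pvGood := by
    intro w hw c hc
    obtain ⟨s, hs, rfl⟩ := List.mem_map.mp hw
    exact hpre' s hs c hc
  have H0 : ∀ w ∈ before.map String.toList,
      pvDepth w < ((([] : List String)).length : Int) → pvOkB [] w = true := by
    intro w hw hdep
    have := pvDepth_nonneg (hwords w hw)
    simp at hdep; omega
  rw [pvDfs_eq (before.map String.toList) hwords 8 []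
        ((PySem.List.pyRange 0 8 1).map (fun i => pvChr (97 + i))) (by decide) (by decide) H0]
  simp only [List.nil_append]
  rw [show (PySem.List.pyRange 0 8 1).map (fun i => pvChr (97 + i))
        = (PySem.List.pyRange 0 8 1).map (fun v => pvChr (97 + v)) from rfl]
  rw [pvPerms_map (fun v => pvChr (97 + v)) (PySem.List.pyRange 0 8 1)]
  rw [pvFindSome?_map]
  rw [pvLoopA_eq]
  apply pvFindSome?_congr
  intro p hp
  have hp8 : p.length = 8 := by
    have := pvPerms_length (PySem.List.pyRange 0 8 1) p hp
    simpa using this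
  have hta : List.map (fun v => pvChr (97 + v)) p = pvToAssign p := rfl
  rw [hta]
  have hok : pvOkA (pvDictA p) before = pvFullOK (before.map String.toList) (pvToAssign p) := by
    rw [pvOkA_eq]
    unfold pvFullOK
    rw [List.all_map]
    apply pvAll_congr
    intro s hs
    have hsgood : ∀ c ∈ s.toList, c ∈ pvGood := fun c hc => hpre' s hs c hc
    simp only [Function.comp]
    unfold pvOkB
    rw [pvMappedB_toAssign p hp8 s hsgood]
    simp only [Option.elim_some]
    rw [pvContains_valid]
  unfold pvF
  rw [← hok]
  by_cases h : pvOkA (pvDictA p) before = true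
  · simp only [h, if_true, pvItems_eq p hp8]
  · simp only [Bool.not_eq_true] at h
    simp [h]
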